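-- pv_equiv track=rewrite | github.com/Steven-ZhangJM/CS263_Final_Project | solution_gen/p056_1.py | sumDigits_a_b_6
-- ===== SOURCE A (Python) =====
-- def sumDigits_a_b_6(a, b):
--     """
--     Time: O(Nlog(1 + log N))/O(N)
--     Space: O(1)
--     """
--     res = 0
--     while a!= 0:
--         res += (a % 10)
--         a = a // 10
--
--     sum = 10
--     while b!= 1:
--         sum = sum * 10 + res%10
--         b = b//10
--
--     return sum
-- ===== SOURCE B (Python) =====
-- def sumDigits_a_b_6(a, b):
--     # Recursive decomposition (no accumulator loops) plus a closed-form
--     # repunit construction instead of A's two multiply-add while-loops.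
--     def digit_sum(n):
--         return 0 if n == 0 else n % 10 + digit_sum(n // 10)
--
--     def width(n):
--         return 0 if n == 1 else 1 + width(n // 10)
--
--     d = digit_sum(a) % 10
--     c = width(b)
--     p = 10 ** c
--     return 10 * p + d * (p - 1) // 9
-- ===== Notes on version B (the rewrite author's own statement) =====
-- stated objective: alternative
-- what changed: A's two accumulator while-loops are replaced by two plain structural recursions (digit_sum with no accumulator, a width counter) and the result is built by the closed-form repunit formula 10*10**c + d*(10**c-1)//9 instead of repeated multiply-add.
import Mathlib
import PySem

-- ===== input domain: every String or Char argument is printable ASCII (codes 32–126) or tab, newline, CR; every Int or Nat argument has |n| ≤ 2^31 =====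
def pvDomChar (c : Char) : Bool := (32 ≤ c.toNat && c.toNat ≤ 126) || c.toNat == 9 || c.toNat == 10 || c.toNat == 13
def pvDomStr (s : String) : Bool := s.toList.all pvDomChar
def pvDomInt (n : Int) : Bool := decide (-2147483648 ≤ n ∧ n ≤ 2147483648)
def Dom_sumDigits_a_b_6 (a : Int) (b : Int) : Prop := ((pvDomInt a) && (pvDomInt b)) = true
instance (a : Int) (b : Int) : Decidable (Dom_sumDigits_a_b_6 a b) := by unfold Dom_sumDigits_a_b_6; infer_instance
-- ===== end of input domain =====

-- B replaces A's two accumulator while-loops by plain structural recursions and the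
-- closed-form repunit construction 10*10^c + d*(10^c-1)//9 (objective: alternative).

-- ===== PORT A =====
-- termination helper for the while-loops / recursions (cited by decreasing_by)
theorem pvFloordiv10_toNat_lt (a : Int) (h : 0 < a) :
    (PySem.Int.floordiv a 10).toNat < a.toNat := by
  rw [PySem.Int.floordiv_eq_ediv_of_pos (by omega : (0:Int) < 10)]
  omega

-- while a != 0: res += a % 10; a //= 10   (guard 0 < a makes it total; identical to Python on a ≥ 0)
def pvResLoopA (res a : Int) : Int :=
  if _h : 0 < a then pvResLoopA (res + PySem.Int.mod a 10) (PySem.Int.floordiv a 10) else res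
termination_by a.toNat
decreasing_by exact pvFloordiv10_toNat_lt a _h

-- while b != 1: sum = sum*10 + res%10; b //= 10   (guard 1 < b makes it total; identical to Python while it terminates)
def pvSumLoopA (res sum b : Int) : Int :=
  if h : 1 < b then pvSumLoopA res (sum * 10 + PySem.Int.mod res 10) (PySem.Int.floordiv b 10) else sum
termination_by b.toNat
decreasing_by exact pvFloordiv10_toNat_lt b (by omega)

def sumDigits_a_b_6 (a : Int) (b : Int) : Int :=
  let res := pvResLoopA 0 a
  pvSumLoopA res 10 b

-- ===== PORT B =====
-- digit_sum(n) = 0 if n == 0 else n % 10 + digit_sum(n // 10)   (guard totalises; identical to Python on n ≥ 0)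
def pvDigitSumB (n : Int) : Int :=
  if h : 0 < n then PySem.Int.mod n 10 + pvDigitSumB (PySem.Int.floordiv n 10) else 0
termination_by n.toNat
decreasing_by exact pvFloordiv10_toNat_lt n h

-- width(n) = 0 if n == 1 else 1 + width(n // 10)   (guard totalises; identical to Python while it terminates)
def pvWidthB (n : Int) : Int :=
  if h : 1 < n then 1 + pvWidthB (PySem.Int.floordiv n 10) else 0
termination_by n.toNat
decreasing_by exact pvFloordiv10_toNat_lt n (by omega)

def sumDigits_a_b_6_alt (a : Int) (b : Int) : Int :=
  let d := PySem.Int.mod (pvDigitSumB a) 10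
  let c := pvWidthB b
  let p : Int := 10 ^ c.toNat   -- Python 10 ** c; exact since c ≥ 0 by construction
  10 * p + PySem.Int.floordiv (d * (p - 1)) 9

-- ===== PRECONDITION & SPEC =====
-- Pre_ excludes exactly the inputs where Python A never returns (infinite loop, no exception):
-- the first loop hangs for a < 0, the second hangs unless repeated b//10 reaches 1,
-- i.e. unless b ≥ 1 with leading decimal digit 1.
def Pre_sumDigits_a_b_6 (a : Int) (b : Int) : Prop :=
  0 ≤ a ∧ 1 ≤ b ∧ PySem.Str.startswith (PySem.Int.toStr b) "1" = true
instance (a : Int) (b : Int) : Decidable (Pre_sumDigits_a_b_6 a b) := by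
  unfold Pre_sumDigits_a_b_6; infer_instance
def pvWitness_sumDigits_a_b_6 : Int × Int := (7, 123)

def Spec_sumDigits_a_b_6 (a : Int) (b : Int) (out : Int) : Prop := out = sumDigits_a_b_6_alt a b
instance (a : Int) (b : Int) (out : Int) : Decidable (Spec_sumDigits_a_b_6 a b out) := by
  unfold Spec_sumDigits_a_b_6; infer_instance

-- ===== CLAIM (what is proved, stated in full; the proofs are below) =====
def Claim_equal_sumDigits_a_b_6 : Prop := ∀ (a : Int) (b : Int), Dom_sumDigits_a_b_6 a b → Pre_sumDigits_a_b_6 a b → Spec_sumDigits_a_b_6 a b (sumDigits_a_b_6 a b)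

-- ===== LEMMAS AND PROOFS =====
-- repunit: R 0 = 0, R (n+1) = R n + 10^n
def pvRep : Nat → Int
  | 0 => 0
  | n + 1 => pvRep n + 10 ^ n

theorem pvRep_nine (n : Nat) : 9 * pvRep n = 10 ^ n - 1 := by
  induction n with
  | zero => simp [pvRep]
  | succ n ih => simp [pvRep, pow_succ]; linarith

theorem pv_b_induct (P : Int → Prop)
    (h1 : ∀ b, 1 < b → P (PySem.Int.floordiv b 10) → P b)
    (h2 : ∀ b, ¬ 1 < b → P b) : ∀ b, P b := by
  intro b
  by_cases h : 1 < b
  · have : (PySem.Int.floordiv b 10).toNat < b.toNat := pvFloordiv10_toNat_lt b (by omega)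
    exact h1 b h (pv_b_induct P h1 h2 _)
  · exact h2 b h
termination_by b => b.toNat
decreasing_by exact this

theorem pv_a_induct (P : Int → Prop)
    (h1 : ∀ a, 0 < a → P (PySem.Int.floordiv a 10) → P a)
    (h2 : ∀ a, ¬ 0 < a → P a) : ∀ a, P a := by
  intro a
  by_cases h : 0 < a
  · have : (PySem.Int.floordiv a 10).toNat < a.toNat := pvFloordiv10_toNat_lt a h
    exact h1 a h (pv_a_induct P h1 h2 _)
  · exact h2 a h
termination_by a => a.toNat
decreasing_by exact this

theorem pvWidth_nonneg (b : Int) : 0 ≤ pvWidthB b := by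
  induction b using pv_b_induct with
  | h1 b h ih => rw [pvWidthB]; simp only [h, dif_pos]; omega
  | h2 b h => rw [pvWidthB]; simp [h]

-- A's accumulation loop equals the closed form in B's width
theorem pvSumLoop_closed (res : Int) (b sum : Int) :
    pvSumLoopA res sum b =
      sum * 10 ^ (pvWidthB b).toNat + PySem.Int.mod res 10 * pvRep (pvWidthB b).toNat := by
  induction b using pv_b_induct generalizing sum with
  | h1 b h ih =>
    rw [pvSumLoopA, pvWidthB]
    simp only [h, dif_pos]
    rw [ih]
    have h0 := pvWidth_nonneg (PySem.Int.floordiv b 10)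
    have htn : (1 + pvWidthB (PySem.Int.floordiv b 10)).toNat
        = (pvWidthB (PySem.Int.floordiv b 10)).toNat + 1 := by omega
    rw [htn]
    simp only [pvRep, pow_succ]
    ring
  | h2 b h =>
    rw [pvSumLoopA, pvWidthB]
    simp only [h, dif_neg, not_false_iff]
    simp [pvRep]

-- A's digit-sum loop (with accumulator) equals B's plain recursion
theorem pvResLoop_eq (a : Int) : ∀ res, pvResLoopA res a = res + pvDigitSumB a := by
  induction a using pv_a_induct with
  | h1 a h ih =>
    intro res
    rw [pvResLoopA, pvDigitSumB]
    simp only [h, dif_pos]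
    rw [ih]
    ring
  | h2 a h => intro res; rw [pvResLoopA, pvDigitSumB]; simp [h]

theorem pvFloordiv_nine_mul (m : Int) : PySem.Int.floordiv (9 * m) 9 = m := by
  rw [PySem.Int.floordiv_eq_ediv_of_pos (by omega : (0:Int) < 9)]
  omega

-- the equality in fact holds for the total Lean ports (their guards totalise the loops),
-- so the Pre_ components are consumed but the computation needs no case split on them
theorem pvMain (a b : Int) (_ha : 0 ≤ a) (_hb : 1 ≤ b) :
    sumDigits_a_b_6 a b = sumDigits_a_b_6_alt a b := by
  unfold sumDigits_a_b_6 sumDigits_a_b_6_alt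
  simp only [pvResLoop_eq, zero_add]
  rw [pvSumLoop_closed]
  rw [show PySem.Int.mod (pvDigitSumB a) 10 * (10 ^ (pvWidthB b).toNat - 1)
      = 9 * (PySem.Int.mod (pvDigitSumB a) 10 * pvRep (pvWidthB b).toNat) from by
    rw [← pvRep_nine]; ring]
  rw [pvFloordiv_nine_mul]

-- ===== VERDICT (by name: the statement is the Claim_ definition above) =====
theorem sumDigits_a_b_6_spec : Claim_equal_sumDigits_a_b_6 := by
  intro a b _ h
  exact pvMain a b h.1 h.2.1
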